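-- pv_equiv track=rewrite | github.com/dattt19uit/OpenABC | datagen/experimental/generate_nl_logic_dataset.py | _cmp_gt_lt_expr
-- ===== SOURCE A (Python) =====
-- from typing import Dict, List, Tuple, Optional
--
-- def _cmp_gt_lt_expr(a_bits: List[str], b_bits: List[str], mode: str) -> str:
--     # mode: 'gt' or 'lt'
--     n = len(a_bits)
--     cmp_terms = []
--     for i in reversed(range(n)):
--         ai = a_bits[i]
--         bi = b_bits[i]
--         higher_equal_terms = []
--         for j in range(i + 1, n):
--             higher_equal_terms.append(f"~({a_bits[j]} ^ {b_bits[j]})")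
--         prefix = " & ".join(higher_equal_terms) if higher_equal_terms else "1"
--         if mode == "gt":
--             cmp_terms.append(f"({prefix} & {ai} & ~{bi})")
--         else:
--             cmp_terms.append(f"({prefix} & ~{ai} & {bi})")
--     return " | ".join(cmp_terms) if cmp_terms else "0"
-- ===== SOURCE B (Python) =====
-- def _cmp_gt_lt_expr(a_bits, b_bits, mode):
--     # Single descending pass: maintain the higher-bits-equal prefix terms
--     # instead of rebuilding them with an inner loop at every position.
--     n = len(a_bits)
--     gt = (mode == "gt")
--     eq_terms = []
--     terms = []
--     for i in range(n - 1, -1, -1):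
--         prefix = " & ".join(eq_terms) if eq_terms else "1"
--         ai = a_bits[i]
--         bi = b_bits[i]
--         if gt:
--             terms.append(f"({prefix} & {ai} & ~{bi})")
--         else:
--             terms.append(f"({prefix} & ~{ai} & {bi})")
--         eq_terms = [f"~({ai} ^ {bi})"] + eq_terms
--     return " | ".join(terms) if terms else "0"
-- ===== Notes on version B (the rewrite author's own statement) =====
-- stated objective: alternative
-- what changed: The inner j-loop that rebuilds the higher-equal prefix for every bit is replaced by a single descending pass that maintains the prefix-term list incrementally (prepending one equality term per step).
import Mathlib
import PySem

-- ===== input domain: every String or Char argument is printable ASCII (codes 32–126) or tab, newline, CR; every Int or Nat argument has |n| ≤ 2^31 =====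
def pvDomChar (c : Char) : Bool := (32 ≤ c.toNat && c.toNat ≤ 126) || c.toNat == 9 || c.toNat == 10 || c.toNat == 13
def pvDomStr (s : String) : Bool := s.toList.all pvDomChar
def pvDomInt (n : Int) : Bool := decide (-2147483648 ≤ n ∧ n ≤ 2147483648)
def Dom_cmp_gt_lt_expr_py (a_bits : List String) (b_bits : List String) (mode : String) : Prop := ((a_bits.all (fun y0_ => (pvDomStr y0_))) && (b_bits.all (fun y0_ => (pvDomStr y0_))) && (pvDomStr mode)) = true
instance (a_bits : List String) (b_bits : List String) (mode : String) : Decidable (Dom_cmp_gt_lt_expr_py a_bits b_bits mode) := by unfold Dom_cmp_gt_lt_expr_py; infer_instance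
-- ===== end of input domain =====

-- ===== PORT A =====
-- B changes the decomposition: the inner prefix-rebuilding loop becomes a maintained accumulator; same output.
-- Indexing a_bits[i]/b_bits[i]: exact under Pre_ (every index is in range there; Python raises IndexError otherwise).
def cmp_gt_lt_expr_py (a_bits : List String) (b_bits : List String) (mode : String) : String :=
  let n := a_bits.length
  let cmp_terms := ((List.range n).reverse).foldl (fun acc i =>
    let ai := a_bits.getD i ""
    let bi := b_bits.getD i ""
    let higher_equal_terms := (List.range' (i + 1) (n - (i + 1))).map
      (fun j => "~(" ++ a_bits.getD j "" ++ " ^ " ++ b_bits.getD j "" ++ ")")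
    let pfx := if higher_equal_terms ≠ [] then PySem.Str.join " & " higher_equal_terms else "1"
    let term := if mode == "gt" then "(" ++ pfx ++ " & " ++ ai ++ " & ~" ++ bi ++ ")"
                else "(" ++ pfx ++ " & ~" ++ ai ++ " & " ++ bi ++ ")"
    acc ++ [term]) []
  if cmp_terms ≠ [] then PySem.Str.join " | " cmp_terms else "0"

-- ===== PORT B =====
-- B's loop 'for i in range(n-1,-1,-1)' with state (eq_terms, terms): counter k+1 processes index i = k, then recurses with counter k.
def pvAltLoop (a_bits b_bits : List String) (gt : Bool) : Nat → List String → List String → List String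
  | 0, _, terms => terms
  | k + 1, eq_terms, terms =>
    let pfx := if eq_terms ≠ [] then PySem.Str.join " & " eq_terms else "1"
    let ai := a_bits.getD k ""
    let bi := b_bits.getD k ""
    let term := if gt then "(" ++ pfx ++ " & " ++ ai ++ " & ~" ++ bi ++ ")"
                else "(" ++ pfx ++ " & ~" ++ ai ++ " & " ++ bi ++ ")"
    pvAltLoop a_bits b_bits gt k (("~(" ++ ai ++ " ^ " ++ bi ++ ")") :: eq_terms) (terms ++ [term])

def cmp_gt_lt_expr_py_alt (a_bits : List String) (b_bits : List String) (mode : String) : String :=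
  let terms := pvAltLoop a_bits b_bits (mode == "gt") a_bits.length [] []
  if terms ≠ [] then PySem.Str.join " | " terms else "0"

-- ===== PRECONDITION & SPEC =====
-- Python A raises IndexError iff b_bits is shorter than a_bits (it reads b_bits[i] for every i < len(a_bits)).
def Pre_cmp_gt_lt_expr_py (a_bits : List String) (b_bits : List String) (mode : String) : Prop :=
  a_bits.length ≤ b_bits.length

instance (a_bits : List String) (b_bits : List String) (mode : String) : Decidable (Pre_cmp_gt_lt_expr_py a_bits b_bits mode) := by unfold Pre_cmp_gt_lt_expr_py; infer_instance

def pvWitness_cmp_gt_lt_expr_py : List String × List String × String := (["a0", "a1"], ["b0", "b1"], "gt")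

def Spec_cmp_gt_lt_expr_py (a_bits : List String) (b_bits : List String) (mode : String) (out : String) : Prop := out = cmp_gt_lt_expr_py_alt a_bits b_bits mode
instance (a_bits : List String) (b_bits : List String) (mode : String) (out : String) : Decidable (Spec_cmp_gt_lt_expr_py a_bits b_bits mode out) := by unfold Spec_cmp_gt_lt_expr_py; infer_instance

-- ===== CLAIM (what is proved, stated in full; the proofs are below) =====
def Claim_equal_cmp_gt_lt_expr_py : Prop := ∀ (a_bits : List String) (b_bits : List String) (mode : String), Dom_cmp_gt_lt_expr_py a_bits b_bits mode → Pre_cmp_gt_lt_expr_py a_bits b_bits mode → Spec_cmp_gt_lt_expr_py a_bits b_bits mode (cmp_gt_lt_expr_py a_bits b_bits mode)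

-- ===== LEMMAS AND PROOFS =====

def pvEqT (a_bits b_bits : List String) (j : Nat) : String :=
  "~(" ++ a_bits.getD j "" ++ " ^ " ++ b_bits.getD j "" ++ ")"

def pvATerm (a_bits b_bits : List String) (gt : Bool) (n i : Nat) : String :=
  let ai := a_bits.getD i ""
  let bi := b_bits.getD i ""
  let higher_equal_terms := (List.range' (i + 1) (n - (i + 1))).map (pvEqT a_bits b_bits)
  let pfx := if higher_equal_terms ≠ [] then PySem.Str.join " & " higher_equal_terms else "1"
  if gt then "(" ++ pfx ++ " & " ++ ai ++ " & ~" ++ bi ++ ")"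
  else "(" ++ pfx ++ " & ~" ++ ai ++ " & " ++ bi ++ ")"

theorem pv_foldl_snoc {α β : Type} (f : α → β) : ∀ (l : List α) (init : List β),
    l.foldl (fun acc i => acc ++ [f i]) init = init ++ l.map f := by
  intro l
  induction l with
  | nil => simp
  | cons x xs ih => intro init; simp [List.foldl, ih]

theorem pvAltLoop_eq (a_bits b_bits : List String) (gt : Bool) (n : Nat) :
    ∀ (k : Nat), k ≤ n → ∀ (terms : List String),
      pvAltLoop a_bits b_bits gt k ((List.range' k (n - k)).map (pvEqT a_bits b_bits)) terms
        = terms ++ ((List.range k).reverse).map (pvATerm a_bits b_bits gt n) := by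
  intro k
  induction k with
  | zero => intro _ terms; simp [pvAltLoop]
  | succ k ih =>
    intro hk terms
    have hrange : (List.range' k (n - k)).map (pvEqT a_bits b_bits)
        = pvEqT a_bits b_bits k :: (List.range' (k + 1) (n - (k + 1))).map (pvEqT a_bits b_bits) := by
      have : n - k = (n - (k + 1)) + 1 := by omega
      rw [this, List.range'_succ, List.map_cons]
    have hstep : pvAltLoop a_bits b_bits gt (k + 1)
        ((List.range' (k + 1) (n - (k + 1))).map (pvEqT a_bits b_bits)) terms
        = pvAltLoop a_bits b_bits gt k ((List.range' k (n - k)).map (pvEqT a_bits b_bits))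
            (terms ++ [pvATerm a_bits b_bits gt n k]) := by
      rw [hrange]
      rfl
    rw [hstep, ih (by omega)]
    rw [List.range_succ]
    simp

theorem cmp_terms_eq (a_bits b_bits : List String) (mode : String) :
    cmp_gt_lt_expr_py a_bits b_bits mode = cmp_gt_lt_expr_py_alt a_bits b_bits mode := by
  unfold cmp_gt_lt_expr_py cmp_gt_lt_expr_py_alt
  have h1 : ((List.range a_bits.length).reverse).foldl
      (fun (acc : List String) i =>
        let ai := a_bits.getD i ""
        let bi := b_bits.getD i ""
        let higher_equal_terms := (List.range' (i + 1) (a_bits.length - (i + 1))).map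
          (fun j => "~(" ++ a_bits.getD j "" ++ " ^ " ++ b_bits.getD j "" ++ ")")
        let pfx := if higher_equal_terms ≠ [] then PySem.Str.join " & " higher_equal_terms else "1"
        let term := if mode == "gt" then "(" ++ pfx ++ " & " ++ ai ++ " & ~" ++ bi ++ ")"
                    else "(" ++ pfx ++ " & ~" ++ ai ++ " & " ++ bi ++ ")"
        acc ++ [term]) []
      = ((List.range a_bits.length).reverse).map (pvATerm a_bits b_bits (mode == "gt") a_bits.length) := by
    have := pv_foldl_snoc (pvATerm a_bits b_bits (mode == "gt") a_bits.length)
      ((List.range a_bits.length).reverse) []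
    simpa [pvATerm, pvEqT] using this
  have h2 : pvAltLoop a_bits b_bits (mode == "gt") a_bits.length [] []
      = ((List.range a_bits.length).reverse).map (pvATerm a_bits b_bits (mode == "gt") a_bits.length) := by
    have := pvAltLoop_eq a_bits b_bits (mode == "gt") a_bits.length a_bits.length (le_refl _) []
    simpa using this
  simp only [h1, h2]

-- ===== VERDICT (by name: the statement is the Claim_ definition above) =====
theorem cmp_gt_lt_expr_py_spec : Claim_equal_cmp_gt_lt_expr_py := by
  intro a_bits b_bits mode _ _
  unfold Spec_cmp_gt_lt_expr_py
  exact cmp_terms_eq a_bits b_bits mode
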